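-- pv_equiv track=rewrite | github.com/ndtands/Algorithm_and_data_structer | _tham_lam.py | MinGroup
-- ===== SOURCE A (Python) =====
-- def MinGroup(C,L):
--     C.sort()
--     i=0
--     R=[]
--     while i<len(C):
--         [l,r]=[C[i],C[i]+L]
--         R.append(l)
--         i+=1
--         while i<len(C) and r <=C[i]:
--             i+=1
--     return len(R)
-- ===== SOURCE B (Python) =====
-- def MinGroup(C, L):
--     # Sort in place (matches A's argument mutation); then the answer is simply
--     # the index of the first adjacent gap >= L, else len(C).
--     C.sort()
--     for i in range(1, len(C)):
--         if C[i] - C[i - 1] >= L: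
--             return i
--     return len(C)
-- ===== Notes on version B (the rewrite author's own statement) =====
-- stated objective: simpler
-- what changed: A's nested while loops that build a list R of group starts are replaced by a single scan after the same in-place sort that returns the index of the first adjacent gap >= L (else len(C)); no list is built and no interval endpoint is tracked.
import Mathlib
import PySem

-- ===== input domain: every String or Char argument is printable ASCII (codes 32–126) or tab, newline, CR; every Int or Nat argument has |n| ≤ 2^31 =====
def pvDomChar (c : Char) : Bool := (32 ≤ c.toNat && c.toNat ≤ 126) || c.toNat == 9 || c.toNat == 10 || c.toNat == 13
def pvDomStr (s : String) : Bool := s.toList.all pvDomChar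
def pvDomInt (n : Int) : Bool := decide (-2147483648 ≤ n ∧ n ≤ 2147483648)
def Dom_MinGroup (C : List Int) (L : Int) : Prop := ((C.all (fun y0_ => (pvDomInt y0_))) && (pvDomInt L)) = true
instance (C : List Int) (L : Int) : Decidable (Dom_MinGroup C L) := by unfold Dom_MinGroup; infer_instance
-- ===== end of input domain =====

-- B replaces A's nested while loops (which build a list R of group starts) by a single scan,
-- after the same in-place sort, for the first adjacent gap ≥ L (simpler decomposition).
-- Both A and B sort the argument list in place; the equivalence proved is about the return value.
-- Loops are ported as structural recursion on a fuel bound (Cs.length); the index strictly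
-- increases each step, so fuel Cs.length is always enough — a totality guard, not an algorithm change.

-- ===== PORT A =====
-- inner while: while i < len(C) and r <= C[i]: i += 1
def pySkipA (Cs : List Int) (r : Int) : Nat → Nat → Nat
  | 0, i => i
  | fuel + 1, i =>
    if h : i < Cs.length then
      if r ≤ Cs[i] then pySkipA Cs r fuel (i + 1) else i
    else i

-- outer while: appends C[i] to R, then skips with the inner while
def pyLoopA (Cs : List Int) (L : Int) : Nat → Nat → List Int → List Int
  | 0, _, R => R
  | fuel + 1, i, R =>
    if h : i < Cs.length then
      pyLoopA Cs L fuel (pySkipA Cs (Cs[i] + L) Cs.length (i + 1)) (R ++ [Cs[i]])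
    else R

def MinGroup (C : List Int) (L : Int) : Int :=
  let Cs := PySem.List.sorted C (fun x => x)
  ((pyLoopA Cs L Cs.length 0 []).length : Int)

-- ===== PORT B =====
-- for i in range(1, len(C)): if C[i] - C[i-1] >= L: return i ; return len(C)
def scanB (Cs : List Int) (L : Int) : Nat → Nat → Int
  | 0, _ => (Cs.length : Int)
  | fuel + 1, i =>
    if h : i < Cs.length then
      if Cs[i] - Cs[i - 1]! ≥ L then (i : Int) else scanB Cs L fuel (i + 1)
    else (Cs.length : Int)

def MinGroup_alt (C : List Int) (L : Int) : Int :=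
  let Cs := PySem.List.sorted C (fun x => x)
  scanB Cs L Cs.length 1

-- ===== PRECONDITION & SPEC =====
def Spec_MinGroup (C : List Int) (L : Int) (out : Int) : Prop := out = MinGroup_alt C L
instance (C : List Int) (L : Int) (out : Int) : Decidable (Spec_MinGroup C L out) := by unfold Spec_MinGroup; infer_instance

-- ===== CLAIM (what is proved, stated in full; the proofs are below) =====
def Claim_equal_MinGroup : Prop := ∀ (C : List Int) (L : Int), Dom_MinGroup C L → Spec_MinGroup C L (MinGroup C L)

-- ===== LEMMAS AND PROOFS =====

-- if the inner while's condition fails at i, it does not move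
theorem pySkipA_id (Cs : List Int) (r : Int) (fuel i : Nat)
    (h : ∀ hi : i < Cs.length, ¬ r ≤ Cs[i]) : pySkipA Cs r fuel i = i := by
  cases fuel with
  | zero => rfl
  | succ fuel =>
    rw [pySkipA]
    split
    · next hi => simp [h hi]
    · rfl

-- on a sorted list, once the inner while's condition holds it holds up to the end
theorem pySkipA_eq_len (Cs : List Int) (r : Int) (hs : Cs.Pairwise (· ≤ ·)) :
    ∀ fuel i (hi : i < Cs.length), Cs.length ≤ fuel + i → r ≤ Cs[i] →
      pySkipA Cs r fuel i = Cs.length := by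
  intro fuel
  induction fuel with
  | zero => intro i hi hf _; omega
  | succ fuel ih =>
    intro i hi hf hr
    rw [pySkipA]
    simp only [hi, dif_pos, hr, if_pos]
    by_cases h1 : i + 1 < Cs.length
    · have hmono : Cs[i] ≤ Cs[i + 1] :=
        List.pairwise_iff_getElem.mp hs i (i + 1) hi h1 (Nat.lt_succ_self i)
      exact ih (i + 1) h1 (by omega) (le_trans hr hmono)
    · rw [pySkipA_id Cs r fuel (i + 1) (fun hi' _ => h1 hi')]
      omega

theorem pyLoopA_stop (Cs : List Int) (L : Int) (fuel i : Nat) (R : List Int)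
    (h : ¬ i < Cs.length) : pyLoopA Cs L fuel i R = R := by
  cases fuel with
  | zero => rfl
  | succ fuel => rw [pyLoopA]; simp [h]

theorem scanB_stop (Cs : List Int) (L : Int) (fuel i : Nat) (h : ¬ i < Cs.length) :
    scanB Cs L fuel i = (Cs.length : Int) := by
  cases fuel with
  | zero => rfl
  | succ fuel => rw [scanB]; simp [h]

theorem scanB_step_pos (Cs : List Int) (L : Int) (fuel i : Nat) (h : i < Cs.length)
    (hg : Cs[i] - Cs[i - 1]! ≥ L) : scanB Cs L (fuel + 1) i = (i : Int) := by
  rw [scanB, dif_pos h, if_pos hg]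

theorem scanB_step_neg (Cs : List Int) (L : Int) (fuel i : Nat) (h : i < Cs.length)
    (hg : ¬ Cs[i] - Cs[i - 1]! ≥ L) : scanB Cs L (fuel + 1) i = scanB Cs L fuel (i + 1) := by
  rw [scanB, dif_pos h, if_neg hg]

-- main invariant: the length of A's group list equals B's scan result, shifted
theorem loopA_scanB (Cs : List Int) (L : Int) (hs : Cs.Pairwise (· ≤ ·)) :
    ∀ fuel i (R : List Int), i ≤ Cs.length → Cs.length ≤ fuel + i →
      ((pyLoopA Cs L fuel i R).length : Int) =
        (R.length : Int) + scanB Cs L fuel (i + 1) - (i : Int) := by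
  intro fuel
  induction fuel with
  | zero =>
    intro i R hle hf
    have : i = Cs.length := by omega
    simp [pyLoopA, scanB, this]
  | succ fuel ih =>
    intro i R hle hf
    rw [pyLoopA]
    by_cases hi : i < Cs.length
    · simp only [hi, dif_pos]
      have he : Cs[i]! = Cs[i] := by
        simp [List.getElem!_eq_getElem?_getD, List.getElem?_eq_getElem hi]
      by_cases hg : i + 1 < Cs.length ∧ Cs[i] + L ≤ Cs[i + 1]!
      · -- gap: the inner while runs to the end, B's scan stops here
        have he1 : Cs[i + 1]! = Cs[i + 1]'hg.1 := by
          simp [List.getElem!_eq_getElem?_getD, List.getElem?_eq_getElem hg.1]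
        rw [pySkipA_eq_len Cs (Cs[i] + L) hs Cs.length (i + 1) hg.1 (by omega) (he1 ▸ hg.2)]
        rw [pyLoopA_stop Cs L fuel Cs.length _ (lt_irrefl _)]
        have hc : Cs[i + 1]'hg.1 - Cs[i + 1 - 1]! ≥ L := by
          show Cs[i + 1]'hg.1 - Cs[i]! ≥ L
          rw [he, ← he1]; have := hg.2; omega
        rw [scanB_step_pos Cs L fuel (i + 1) hg.1 hc]
        simp only [List.length_append, List.length_cons, List.length_nil]
        push_cast; ring
      · -- no gap: the inner while does not move, both advance by one
        have hid : pySkipA Cs (Cs[i] + L) Cs.length (i + 1) = i + 1 := by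
          apply pySkipA_id
          intro h1 hr
          refine hg ⟨h1, ?_⟩
          have : Cs[i + 1]! = Cs[i + 1]'h1 := by
            simp [List.getElem!_eq_getElem?_getD, List.getElem?_eq_getElem h1]
          rw [this]; exact hr
        rw [hid]
        rw [ih (i + 1) (R ++ [Cs[i]]) (by omega) (by omega)]
        by_cases h1 : i + 1 < Cs.length
        · have hlt : ¬ Cs[i + 1]'h1 - Cs[i + 1 - 1]! ≥ L := by
            show ¬ Cs[i + 1]'h1 - Cs[i]! ≥ L
            rw [he]
            intro hr
            have : Cs[i + 1]! = Cs[i + 1]'h1 := by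
              simp [List.getElem!_eq_getElem?_getD, List.getElem?_eq_getElem h1]
            exact hg ⟨h1, by rw [this]; omega⟩
          rw [scanB_step_neg Cs L fuel (i + 1) h1 hlt]
          simp only [List.length_append, List.length_cons, List.length_nil]
          push_cast; ring
        · rw [scanB_stop Cs L (fuel + 1) (i + 1) h1, scanB_stop Cs L fuel (i + 1 + 1) (by omega)]
          simp only [List.length_append, List.length_cons, List.length_nil]
          push_cast
          omega
    · simp only [hi, dif_neg, not_false_iff]
      rw [scanB_stop Cs L (fuel + 1) (i + 1) (by omega)]
      omega

-- ===== VERDICT (by name: the statement is the Claim_ definition above) =====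
theorem MinGroup_spec : Claim_equal_MinGroup := by
  intro C L _
  unfold Spec_MinGroup MinGroup MinGroup_alt
  have hs := PySem.List.sorted_pairwise C (fun x => x)
  have h := loopA_scanB (PySem.List.sorted C (fun x => x)) L hs
    (PySem.List.sorted C (fun x => x)).length 0 [] (Nat.zero_le _) (by omega)
  simpa using h
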